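-- pv_equiv track=rewrite | github.com/alexruco/lloyd | lloyd/old/bing_organic_results.py | filter_bing_results
-- ===== SOURCE A (Python) =====
-- def filter_bing_results(urls):
--     ignore_patterns = [
--         "go.microsoft.com/fwlink",
--         "bing.com",
--         "microsoft.com",
--         "msn.com",
--         "javascript:void(0);",
--         "/search?q=",
--         "/images/search?",
--         "/videos/search?",
--         "/maps?q=",
--         "/news/search?q=",
--         "/shop?q=",
--         "/travel/search?q=",
--         "/rewards/dashboard",
--         "/homes?FORM=000060",
--         "/bp/verify?FORM=000061",
--         "/?FORM=Z9FD1",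
--         "#",
--     ]
--
--     filtered_urls = []
--     for url in urls:
--         if not any(pattern in url for pattern in ignore_patterns):
--             filtered_urls.append(url)
--
--     return filtered_urls
-- ===== SOURCE B (Python) =====
-- IGNORE_PATTERNS = [
--     "go.microsoft.com/fwlink",
--     "bing.com",
--     "microsoft.com",
--     "msn.com",
--     "javascript:void(0);",
--     "/search?q=",
--     "/images/search?",
--     "/videos/search?",
--     "/maps?q=",
--     "/news/search?q=",
--     "/shop?q=",
--     "/travel/search?q=",
--     "/rewards/dashboard",
--     "/homes?FORM=000060",
--     "/bp/verify?FORM=000061",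
--     "/?FORM=Z9FD1",
--     "#",
-- ]
--
--
-- def filter_bing_results(urls):
--     # Pattern-major sieve: successively strip out the urls matching each pattern.
--     results = list(urls)
--     for pattern in IGNORE_PATTERNS:
--         results = [url for url in results if pattern not in url]
--     return results
-- ===== Notes on version B (the rewrite author's own statement) =====
-- stated objective: alternative
-- what changed: Inverts the loop nesting: instead of scanning all patterns per url and appending survivors, B sieves pattern-major, successively filtering the url list once per ignore pattern.
import Mathlib
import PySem

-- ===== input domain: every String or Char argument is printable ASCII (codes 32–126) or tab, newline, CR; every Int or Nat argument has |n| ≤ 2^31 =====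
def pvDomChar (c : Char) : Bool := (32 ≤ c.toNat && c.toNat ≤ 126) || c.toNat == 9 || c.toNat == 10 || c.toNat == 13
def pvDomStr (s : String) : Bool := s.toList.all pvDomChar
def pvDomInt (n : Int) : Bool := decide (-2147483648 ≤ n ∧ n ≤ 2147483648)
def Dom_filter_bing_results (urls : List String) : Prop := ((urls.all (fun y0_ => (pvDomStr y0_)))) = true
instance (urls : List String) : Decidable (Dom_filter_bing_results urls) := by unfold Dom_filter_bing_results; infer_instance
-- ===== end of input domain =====

-- B sieves pattern-major (one filtering pass of the url list per ignore pattern) instead of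
-- A's url-major scan over all patterns with an append accumulator; alternative loop structure (same asymptotic cost).


-- the module-level ignore list (identical literal in A and B)
def pvIgnorePatterns : List String := [
    "go.microsoft.com/fwlink",
    "bing.com",
    "microsoft.com",
    "msn.com",
    "javascript:void(0);",
    "/search?q=",
    "/images/search?",
    "/videos/search?",
    "/maps?q=",
    "/news/search?q=",
    "/shop?q=",
    "/travel/search?q=",
    "/rewards/dashboard",
    "/homes?FORM=000060",
    "/bp/verify?FORM=000061",
    "/?FORM=Z9FD1",
    "#"]

-- ===== PORT A =====
-- 'for url in urls: if not any(pattern in url for pattern in ignore_patterns): filtered_urls.append(url)'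
def filter_bing_results (urls : List String) : List String :=
  urls.foldl
    (fun filtered_urls url =>
      if !(pvIgnorePatterns.any (fun pattern => PySem.Str.isIn pattern url))
      then filtered_urls ++ [url] else filtered_urls)
    []

-- ===== PORT B =====
-- 'for pattern in IGNORE_PATTERNS: results = [url for url in results if pattern not in url]'
def filter_bing_results_alt (urls : List String) : List String :=
  pvIgnorePatterns.foldl
    (fun results pattern => results.filter (fun url => !(PySem.Str.isIn pattern url)))
    urls

-- ===== PRECONDITION & SPEC =====
def Spec_filter_bing_results (urls : List String) (out : List String) : Prop := out = filter_bing_results_alt urls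
instance (urls : List String) (out : List String) : Decidable (Spec_filter_bing_results urls out) := by unfold Spec_filter_bing_results; infer_instance

-- ===== CLAIM (what is proved, stated in full; the proofs are below) =====
def Claim_equal_filter_bing_results : Prop := ∀ (urls : List String), Dom_filter_bing_results urls → Spec_filter_bing_results urls (filter_bing_results urls)

-- ===== LEMMAS AND PROOFS =====

-- successive one-pattern filters equal one filter by the conjunction over the pattern list
theorem foldl_filter_eq_filter_all (ps : List String) (urls : List String) :
    ps.foldl (fun results pattern => results.filter (fun url => !(PySem.Str.isIn pattern url))) urls
      = urls.filter (fun url => ps.all (fun pattern => !(PySem.Str.isIn pattern url))) := by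
  induction ps generalizing urls with
  | nil => simp
  | cons p ps ih =>
    simp only [List.foldl_cons, ih, List.filter_filter, List.all_cons]
    congr 1
    funext url
    rw [Bool.and_comm]

-- ===== VERDICT (by name: the statement is the Claim_ definition above) =====
theorem filter_bing_results_spec : Claim_equal_filter_bing_results := by
  intro urls _
  unfold Spec_filter_bing_results filter_bing_results filter_bing_results_alt
  rw [PySem.List.foldl_append_if_eq_filter, foldl_filter_eq_filter_all]
  simp only [List.nil_append, List.any_eq_not_all_not, Bool.not_not]
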